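-- pv_equiv track=rewrite | github.com/SebastianJuno/EOT | backend/comparison.py | _flow_sources
-- ===== SOURCE A (Python) =====
-- from collections import defaultdict, deque
--
-- def _flow_sources(
--     successors: dict[int, set[int]],
--     root_uids: set[int],
-- ) -> dict[int, set[int]]:
--     sources: dict[int, set[int]] = defaultdict(set)
--     for root_uid in root_uids:
--         queue: deque[int] = deque([root_uid])
--         visited: set[int] = {root_uid}
--         while queue:
--             node = queue.popleft()
--             for successor_uid in successors.get(node, set()):
--                 if successor_uid not in visited:
--                     visited.add(successor_uid)
--                     queue.append(successor_uid)
--                 sources[successor_uid].add(root_uid)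
--     return sources
-- ===== SOURCE B (Python) =====
-- from collections import defaultdict
--
-- def _flow_sources(
--     successors: dict[int, set[int]],
--     root_uids: set[int],
-- ) -> dict[int, set[int]]:
--     sources: dict[int, set[int]] = defaultdict(set)
--     for root_uid in root_uids:
--         # phase 1: level-synchronous reachability -- expand whole frontiers in
--         # rounds (no queue, no per-node worklist), collecting the nodes level by level
--         order: list[int] = []
--         frontier: list[int] = [root_uid]
--         seen: set[int] = {root_uid}
--         while frontier:
--             order.extend(frontier)
--             nxt: list[int] = []
--             for node in frontier:
--                 for target in successors.get(node, set()):
--                     if target not in seen: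
--                         seen.add(target)
--                         nxt.append(target)
--             frontier = nxt
--         # phase 2: record this root as a source of every edge target out of its levels
--         for node in order:
--             for target in successors.get(node, set()):
--                 sources[target].add(root_uid)
--     return sources
-- ===== Notes on version B (the rewrite author's own statement) =====
-- stated objective: alternative
-- what changed: A's per-root fused BFS (deque worklist popping one node at a time while recording sources inline) is replaced by a level-synchronous reachability that expands whole frontiers in rounds with no queue, followed by a separate recording pass over the collected levels.
import Mathlib
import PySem

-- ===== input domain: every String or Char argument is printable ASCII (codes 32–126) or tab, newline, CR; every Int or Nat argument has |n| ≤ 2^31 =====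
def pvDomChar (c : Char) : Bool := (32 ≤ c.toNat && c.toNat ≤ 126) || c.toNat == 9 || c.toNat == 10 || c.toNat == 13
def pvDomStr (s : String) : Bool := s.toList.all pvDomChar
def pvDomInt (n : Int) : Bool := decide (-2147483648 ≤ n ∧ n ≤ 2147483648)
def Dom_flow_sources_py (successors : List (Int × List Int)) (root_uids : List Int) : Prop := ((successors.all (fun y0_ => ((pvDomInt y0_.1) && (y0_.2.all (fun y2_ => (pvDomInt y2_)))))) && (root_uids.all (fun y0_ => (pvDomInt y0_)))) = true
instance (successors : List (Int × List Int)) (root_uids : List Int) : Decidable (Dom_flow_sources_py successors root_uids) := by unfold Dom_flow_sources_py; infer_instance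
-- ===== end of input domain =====

-- B replaces A's fused deque-worklist BFS (which records sources while popping nodes
-- one at a time) by a level-synchronous reachability: whole frontiers are expanded in
-- rounds (no queue, no per-node pop) and the recording of sources is a separate second
-- pass over the collected levels (objective: alternative decomposition, same cost).
-- The 'fuel' argument of the loops is only a totality guard (chosen ≥ the number of
-- iterations the Python loop performs, which the proofs establish).

-- ===== PORT A =====
-- fused BFS of A: pops a node from the queue, enumerates its successors, updating
-- visited/queue and recording root as a source of each successor in the same pass
def bfsLoopA (succs : PySem.Dict Int (List Int)) (root : Int) :
    Nat → List Int → PySem.Set Int → PySem.Dict Int (PySem.Set Int) → PySem.Dict Int (PySem.Set Int)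
  | 0, _, _, sources => sources
  | _ + 1, [], _, sources => sources
  | f + 1, node :: rest, visited, sources =>
      let st := (PySem.Dict.getD succs node []).foldl
        (fun (st : List Int × PySem.Set Int × PySem.Dict Int (PySem.Set Int)) s =>
          let qv :=
            if PySem.Set.contains st.2.1 s then (st.1, st.2.1)
            else (st.1 ++ [s], PySem.Set.add st.2.1 s)
          (qv.1, qv.2, PySem.Dict.insert st.2.2 s
            (PySem.Set.add (PySem.Dict.getD st.2.2 s PySem.Set.empty) root)))
        (rest, visited, sources)
      bfsLoopA succs root f st.1 st.2.1 st.2.2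

def flow_sources_py (successors : List (Int × List Int)) (root_uids : List Int) : List (Int × List Int) :=
  let succs := PySem.Dict.mk successors
  let fuel := 1 + (successors.map (fun p => p.2.length)).sum
  (root_uids.foldl
    (fun sources root =>
      bfsLoopA succs root fuel [root] (PySem.Set.add PySem.Set.empty root) sources)
    PySem.Dict.empty).items

-- ===== PORT B =====
-- phase 1 of B: level-synchronous reachability — each iteration of the while loop
-- appends the whole current frontier to 'order' and expands it in one sweep into the
-- next frontier of newly seen nodes; no queue and no per-node worklist.
def levelLoop (succs : PySem.Dict Int (List Int)) :
    Nat → List Int → List Int → PySem.Set Int → List Int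
  | 0, order, _, _ => order
  | f + 1, order, frontier, seen =>
      if frontier.isEmpty then order
      else
        let ns := frontier.foldl
          (fun (ns : List Int × PySem.Set Int) node =>
            (PySem.Dict.getD succs node []).foldl
              (fun (ns : List Int × PySem.Set Int) t =>
                if PySem.Set.contains ns.2 t then ns
                else (ns.1 ++ [t], PySem.Set.add ns.2 t)) ns)
          ([], seen)
        levelLoop succs f (order ++ frontier) ns.1 ns.2

-- phase 2 of B: record root as a source of every edge target out of its levels
def recordRoot (succs : PySem.Dict Int (List Int)) (root : Int) (order : List Int)
    (sources : PySem.Dict Int (PySem.Set Int)) : PySem.Dict Int (PySem.Set Int) :=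
  order.foldl
    (fun sources node =>
      (PySem.Dict.getD succs node []).foldl
        (fun sources t =>
          PySem.Dict.insert sources t
            (PySem.Set.add (PySem.Dict.getD sources t PySem.Set.empty) root))
        sources)
    sources

def flow_sources_py_alt (successors : List (Int × List Int)) (root_uids : List Int) : List (Int × List Int) :=
  let succs := PySem.Dict.mk successors
  let fuel := 1 + (successors.map (fun p => p.2.length)).sum
  (root_uids.foldl
    (fun sources root =>
      recordRoot succs root
        (levelLoop succs fuel [] [root] (PySem.Set.add PySem.Set.empty root)) sources)
    PySem.Dict.empty).items

-- ===== PRECONDITION & SPEC =====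
def Spec_flow_sources_py (successors : List (Int × List Int)) (root_uids : List Int) (out : List (Int × List Int)) : Prop := out = flow_sources_py_alt successors root_uids
instance (successors : List (Int × List Int)) (root_uids : List Int) (out : List (Int × List Int)) : Decidable (Spec_flow_sources_py successors root_uids out) := by unfold Spec_flow_sources_py; infer_instance

-- ===== CLAIM (what is proved, stated in full; the proofs are below) =====
def Claim_equal_flow_sources_py : Prop := ∀ (successors : List (Int × List Int)) (root_uids : List Int), Dom_flow_sources_py successors root_uids → Spec_flow_sources_py successors root_uids (flow_sources_py successors root_uids)

-- ===== LEMMAS AND PROOFS =====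

-- proof-only intermediate: a worklist reachability scan walked by an index pointer;
-- A's fused BFS is proved equal to 'recordRoot over reachScan', and B's levelLoop
-- is proved equal to reachScan (whole frontiers at a time), joining the two ports.
def reachScan (succs : PySem.Dict Int (List Int)) :
    Nat → List Int → Nat → PySem.Set Int → List Int
  | 0, reach, i, _ => reach.take i
  | f + 1, reach, i, seen =>
      if h : i < reach.length then
        let rs := (PySem.Dict.getD succs reach[i] []).foldl
          (fun (rs : List Int × PySem.Set Int) t =>
            if PySem.Set.contains rs.2 t then rs else (rs.1 ++ [t], PySem.Set.add rs.2 t))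
          (reach, seen)
        reachScan succs f rs.1 (i + 1) rs.2
      else reach

-- A's fused inner fold is the queue/visited fold paired with the recording fold
theorem foldA_split (root : Int) (l : List Int) (q : List Int) (v : PySem.Set Int)
    (src : PySem.Dict Int (PySem.Set Int)) :
    l.foldl
      (fun (st : List Int × PySem.Set Int × PySem.Dict Int (PySem.Set Int)) s =>
        let qv :=
          if PySem.Set.contains st.2.1 s then (st.1, st.2.1)
          else (st.1 ++ [s], PySem.Set.add st.2.1 s)
        (qv.1, qv.2, PySem.Dict.insert st.2.2 s
          (PySem.Set.add (PySem.Dict.getD st.2.2 s PySem.Set.empty) root)))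
      (q, v, src)
    = (let qv := l.foldl
        (fun (qv : List Int × PySem.Set Int) t =>
          if PySem.Set.contains qv.2 t then qv else (qv.1 ++ [t], PySem.Set.add qv.2 t))
        (q, v)
       (qv.1, qv.2,
        l.foldl
          (fun sources t =>
            PySem.Dict.insert sources t
              (PySem.Set.add (PySem.Dict.getD sources t PySem.Set.empty) root))
          src)) := by
  induction l generalizing q v src with
  | nil => rfl
  | cons s l ih =>
      simp only [List.foldl_cons]
      exact ih _ _ _

-- the queue/visited fold only appends to the queue; the appended part and the
-- final visited set do not depend on the starting queue
theorem foldB_shift (l : List Int) (a : List Int) (s : PySem.Set Int) :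
    l.foldl (fun (qv : List Int × PySem.Set Int) t =>
        if PySem.Set.contains qv.2 t then qv else (qv.1 ++ [t], PySem.Set.add qv.2 t)) (a, s)
    = (a ++ (l.foldl (fun (qv : List Int × PySem.Set Int) t =>
          if PySem.Set.contains qv.2 t then qv else (qv.1 ++ [t], PySem.Set.add qv.2 t)) ([], s)).1,
       (l.foldl (fun (qv : List Int × PySem.Set Int) t =>
          if PySem.Set.contains qv.2 t then qv else (qv.1 ++ [t], PySem.Set.add qv.2 t)) ([], s)).2) := by
  induction l generalizing a s with
  | nil => simp
  | cons t l ih =>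
      simp only [List.foldl_cons]
      by_cases h : PySem.Set.contains s t = true
      · simp only [h, if_true]
        exact ih a s
      · simp only [h, if_false, Bool.false_eq_true]
        rw [ih (a ++ [t]), List.nil_append, ih [t]]
        simp

-- the scan never disturbs the already-processed prefix of the worklist
theorem reachScan_prefix (succs : PySem.Dict Int (List Int)) :
    ∀ (f : Nat) (reach : List Int) (i : Nat) (seen : PySem.Set Int), i ≤ reach.length →
      ∃ t, reachScan succs f reach i seen = reach.take i ++ t := by
  intro f
  induction f with
  | zero =>
      intro reach i seen _
      exact ⟨[], by simp [reachScan]⟩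
  | succ f ih =>
      intro reach i seen hle
      by_cases h : i < reach.length
      · simp only [reachScan, dif_pos h]
        rw [foldB_shift]
        set E := ((PySem.Dict.getD succs reach[i] []).foldl
          (fun (qv : List Int × PySem.Set Int) t =>
            if PySem.Set.contains qv.2 t then qv else (qv.1 ++ [t], PySem.Set.add qv.2 t)) ([], seen)) with hE
        obtain ⟨t, ht⟩ := ih (reach ++ E.1) (i + 1) E.2
          (by simp only [List.length_append]; omega)
        refine ⟨reach[i] :: t, ?_⟩
        have h1 : (reach ++ E.1).take (i + 1) = reach.take (i + 1) := by
          rw [List.take_append_of_le_length (by omega)]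
        have h2 : reach.take (i + 1) = reach.take i ++ [reach[i]] := by
          rw [List.take_add_one]
          simp [List.getElem?_eq_getElem h]
        rw [ht, h1, h2, List.append_assoc]
        rfl
      · exact ⟨[], by simp [reachScan, Nat.le_antisymm hle (by omega)]⟩

-- per root: A's fused BFS from position i of the worklist equals
-- "finish the reachability scan, then record over the yet-unprocessed part"
theorem bfsLoopA_eq_scan (succs : PySem.Dict Int (List Int)) (root : Int) :
    ∀ (f : Nat) (reach : List Int) (i : Nat) (seen : PySem.Set Int)
      (src : PySem.Dict Int (PySem.Set Int)), i ≤ reach.length →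
      bfsLoopA succs root f (reach.drop i) seen src
        = recordRoot succs root ((reachScan succs f reach i seen).drop i) src := by
  intro f
  induction f with
  | zero =>
      intro reach i seen src _
      simp [bfsLoopA, reachScan, recordRoot]
  | succ f ih =>
      intro reach i seen src hle
      by_cases h : i < reach.length
      · have hdrop : reach.drop i = reach[i] :: reach.drop (i + 1) :=
          List.drop_eq_getElem_cons h
        rw [hdrop]
        simp only [bfsLoopA, reachScan, dif_pos h]
        rw [foldA_split]
        simp only []
        rw [foldB_shift (PySem.Dict.getD succs reach[i] []) (reach.drop (i+1)) seen,
            foldB_shift (PySem.Dict.getD succs reach[i] []) reach seen]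
        set E := ((PySem.Dict.getD succs reach[i] []).foldl
          (fun (qv : List Int × PySem.Set Int) t =>
            if PySem.Set.contains qv.2 t then qv else (qv.1 ++ [t], PySem.Set.add qv.2 t)) ([], seen)) with hE
        have hq : reach.drop (i + 1) ++ E.1 = (reach ++ E.1).drop (i + 1) := by
          rw [List.drop_append_of_le_length (by omega)]
        rw [hq, ih (reach ++ E.1) (i + 1) E.2 _ (by simp only [List.length_append]; omega)]
        obtain ⟨t, ht⟩ := reachScan_prefix succs f (reach ++ E.1) (i + 1) E.2
          (by simp only [List.length_append]; omega)
        have h1 : (reach ++ E.1).take (i + 1) = reach.take (i + 1) := by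
          rw [List.take_append_of_le_length (by omega)]
        have h2 : reach.take (i + 1) = reach.take i ++ [reach[i]] := by
          rw [List.take_add_one]
          simp [List.getElem?_eq_getElem h]
        have hlen : (reach.take i).length = i := by simp; omega
        have hlen1 : (reach.take i ++ [reach[i]]).length = i + 1 := by simp; omega
        have hdi : (reachScan succs f (reach ++ E.1) (i + 1) E.2).drop i
            = reach[i] :: (reachScan succs f (reach ++ E.1) (i + 1) E.2).drop (i + 1) := by
          rw [ht, h1, h2, List.append_assoc, List.drop_left' hlen,
              ← List.append_assoc, List.drop_left' hlen1]
          simp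
        rw [hdi]
        simp only [recordRoot, List.foldl_cons]
      · have hi : i = reach.length := by omega
        subst hi
        simp [bfsLoopA, reachScan, recordRoot]

-- specialisation to the start of a root's traversal
theorem bfs_root (succs : PySem.Dict Int (List Int)) (root : Int) (f : Nat)
    (src : PySem.Dict Int (PySem.Set Int)) :
    bfsLoopA succs root f [root] (PySem.Set.add PySem.Set.empty root) src
      = recordRoot succs root
          (reachScan succs f [root] 0 (PySem.Set.add PySem.Set.empty root)) src := by
  have := bfsLoopA_eq_scan succs root f [root] 0 (PySem.Set.add PySem.Set.empty root) src
    (by simp)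
  simpa using this

-- ===== fuel accounting: levelLoop computes reachScan's worklist =====

-- the number of values of allT not yet seen: the fuel measure of both loops
def pvFc (allT : List Int) (seen : PySem.Set Int) : Nat :=
  (allT.filter (fun t => !PySem.Set.contains seen t)).length

theorem contains_add (s : PySem.Set Int) (t u : Int) :
    PySem.Set.contains (PySem.Set.add s t) u = (PySem.Set.contains s u || u == t) := by
  simp only [PySem.Set.contains, List.contains_eq_mem]
  have hb : (u == t) = decide (u = t) := by
    cases hd : decide (u = t) with
    | false =>
        have hne : ¬ u = t := of_decide_eq_false hd
        rw [beq_eq_false_iff_ne]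
        exact hne
    | true =>
        have he : u = t := of_decide_eq_true hd
        subst he
        exact beq_self_eq_true u
  rw [hb]
  by_cases hm : u ∈ PySem.Set.add s t
  · rw [decide_eq_true hm]
    rcases (PySem.Set.mem_add s t u).mp hm with hs | ht'
    · rw [decide_eq_true hs, Bool.true_or]
    · rw [decide_eq_true ht', Bool.or_true]
  · rw [decide_eq_false hm]
    have hs : ¬ u ∈ s := fun h => hm ((PySem.Set.mem_add s t u).mpr (Or.inl h))
    have ht' : ¬ u = t := fun h => hm ((PySem.Set.mem_add s t u).mpr (Or.inr h))
    rw [decide_eq_false hs, decide_eq_false ht', Bool.or_false]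

theorem fc_add_mono (allT : List Int) (seen : PySem.Set Int) (t : Int) :
    pvFc allT (PySem.Set.add seen t) ≤ pvFc allT seen := by
  induction allT with
  | nil => simp [pvFc]
  | cons u l ih =>
      simp only [pvFc, List.filter_cons, contains_add] at *
      cases hcu : PySem.Set.contains seen u <;> cases heu : (u == t) <;>
        simp only [hcu, heu, Bool.or_true, Bool.or_false, Bool.true_or, Bool.not_true,
          Bool.not_false, Bool.false_eq_true, if_false, if_true, List.length_cons] <;>
        omega

theorem fc_add_lt (allT : List Int) (seen : PySem.Set Int) (t : Int)
    (ht : t ∈ allT) (hc : PySem.Set.contains seen t = false) :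
    pvFc allT (PySem.Set.add seen t) + 1 ≤ pvFc allT seen := by
  induction allT with
  | nil => simp at ht
  | cons u l ih =>
      by_cases hu : u = t
      · subst hu
        have hmono := fc_add_mono l seen u
        simp only [pvFc, List.filter_cons, contains_add, hc, beq_self_eq_true,
          Bool.or_true, Bool.not_true, Bool.not_false, Bool.false_eq_true, if_false,
          if_true, List.length_cons] at *
        omega
      · have ht' : t ∈ l := by
          cases ht with
          | head => exact absurd rfl hu
          | tail _ h => exact h
        have h2 := ih ht'
        simp only [pvFc, List.filter_cons, contains_add] at *
        cases hcu : PySem.Set.contains seen u <;> cases heu : (u == t) <;>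
          simp only [hcu, heu, Bool.or_true, Bool.or_false, Bool.true_or, Bool.not_true,
            Bool.not_false, Bool.false_eq_true, if_false, if_true, List.length_cons] <;>
          omega

-- the inner fold: each appended node consumes at least one unseen value of allT
theorem inner_fold_bound (allT : List Int) :
    ∀ (L : List Int) (q : List Int) (seen : PySem.Set Int), (∀ t ∈ L, t ∈ allT) →
      pvFc allT ((L.foldl (fun (qv : List Int × PySem.Set Int) t =>
          if PySem.Set.contains qv.2 t then qv else (qv.1 ++ [t], PySem.Set.add qv.2 t)) (q, seen)).2)
        + ((L.foldl (fun (qv : List Int × PySem.Set Int) t =>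
          if PySem.Set.contains qv.2 t then qv else (qv.1 ++ [t], PySem.Set.add qv.2 t)) (q, seen)).1).length
      ≤ pvFc allT seen + q.length := by
  intro L
  induction L with
  | nil => intro q seen _; simp
  | cons t L ih =>
      intro q seen hsub
      simp only [List.foldl_cons]
      by_cases h : PySem.Set.contains seen t = true
      · simp only [h, if_true]
        exact ih q seen (fun x hx => hsub x (List.mem_cons_of_mem _ hx))
      · simp only [h, Bool.false_eq_true, if_false]
        have h1 := ih (q ++ [t]) (PySem.Set.add seen t)
          (fun x hx => hsub x (List.mem_cons_of_mem _ hx))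
        have h2 := fc_add_lt allT seen t (hsub t (List.mem_cons_self)) (by simpa using h)
        simp only [List.length_append, List.length_cons, List.length_nil] at *
        omega

-- the level fold: the next frontier consumes at least its length from the unseen count
theorem level_fold_bound (succs : PySem.Dict Int (List Int)) (allT : List Int)
    (H : ∀ n t, t ∈ PySem.Dict.getD succs n [] → t ∈ allT) :
    ∀ (frontier : List Int) (acc : List Int) (seen : PySem.Set Int),
      pvFc allT ((frontier.foldl
          (fun (ns : List Int × PySem.Set Int) node =>
            (PySem.Dict.getD succs node []).foldl
              (fun (ns : List Int × PySem.Set Int) t =>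
                if PySem.Set.contains ns.2 t then ns
                else (ns.1 ++ [t], PySem.Set.add ns.2 t)) ns) (acc, seen)).2)
        + ((frontier.foldl
          (fun (ns : List Int × PySem.Set Int) node =>
            (PySem.Dict.getD succs node []).foldl
              (fun (ns : List Int × PySem.Set Int) t =>
                if PySem.Set.contains ns.2 t then ns
                else (ns.1 ++ [t], PySem.Set.add ns.2 t)) ns) (acc, seen)).1).length
      ≤ pvFc allT seen + acc.length := by
  intro frontier
  induction frontier with
  | nil => intro acc seen; simp
  | cons n frontier ih =>
      intro acc seen
      simp only [List.foldl_cons]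
      have hmid := inner_fold_bound allT (PySem.Dict.getD succs n []) acc seen (H n)
      set M := (PySem.Dict.getD succs n []).foldl
        (fun (qv : List Int × PySem.Set Int) t =>
          if PySem.Set.contains qv.2 t then qv else (qv.1 ++ [t], PySem.Set.add qv.2 t)) (acc, seen)
        with hM
      have h1 := ih M.1 M.2
      have : M = (M.1, M.2) := rfl
      rw [← this] at h1
      omega

-- peeling one frontier off the worklist scan: processing frontier.length positions of
-- reachScan is exactly the level fold over the frontier
theorem reachScan_peel (succs : PySem.Dict Int (List Int)) :
    ∀ (frontier : List Int) (f : Nat) (order acc : List Int) (seen : PySem.Set Int),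
      reachScan succs (frontier.length + f) (order ++ (frontier ++ acc)) order.length seen
      = reachScan succs f
          (order ++ (frontier ++ (frontier.foldl
            (fun (ns : List Int × PySem.Set Int) node =>
              (PySem.Dict.getD succs node []).foldl
                (fun (ns : List Int × PySem.Set Int) t =>
                  if PySem.Set.contains ns.2 t then ns
                  else (ns.1 ++ [t], PySem.Set.add ns.2 t)) ns) (acc, seen)).1))
          (order.length + frontier.length)
          ((frontier.foldl
            (fun (ns : List Int × PySem.Set Int) node =>
              (PySem.Dict.getD succs node []).foldl
                (fun (ns : List Int × PySem.Set Int) t =>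
                  if PySem.Set.contains ns.2 t then ns
                  else (ns.1 ++ [t], PySem.Set.add ns.2 t)) ns) (acc, seen)).2) := by
  intro frontier
  induction frontier with
  | nil => intro f order acc seen; simp
  | cons n rest ih =>
      intro f order acc seen
      have hfuel : (n :: rest).length + f = (rest.length + f) + 1 := by simp; omega
      rw [hfuel]
      have hlt : order.length < (order ++ (n :: rest ++ acc)).length := by simp
      simp only [reachScan, dif_pos hlt]
      have hget : (order ++ (n :: rest ++ acc))[order.length] = n := by
        rw [List.getElem_append_right (Nat.le_refl _)]
        simp
      rw [hget]
      rw [foldB_shift (PySem.Dict.getD succs n []) (order ++ (n :: rest ++ acc)) seen]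
      set E := ((PySem.Dict.getD succs n []).foldl
        (fun (qv : List Int × PySem.Set Int) t =>
          if PySem.Set.contains qv.2 t then qv else (qv.1 ++ [t], PySem.Set.add qv.2 t)) ([], seen))
        with hE
      have hlist : order ++ (n :: rest ++ acc) ++ E.1
          = (order ++ [n]) ++ (rest ++ (acc ++ E.1)) := by simp
      have hidx : order.length + 1 = (order ++ [n]).length := by simp
      rw [hlist, hidx, ih f (order ++ [n]) (acc ++ E.1) E.2]
      have hfold : (n :: rest).foldl
            (fun (ns : List Int × PySem.Set Int) node =>
              (PySem.Dict.getD succs node []).foldl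
                (fun (ns : List Int × PySem.Set Int) t =>
                  if PySem.Set.contains ns.2 t then ns
                  else (ns.1 ++ [t], PySem.Set.add ns.2 t)) ns) (acc, seen)
          = rest.foldl
            (fun (ns : List Int × PySem.Set Int) node =>
              (PySem.Dict.getD succs node []).foldl
                (fun (ns : List Int × PySem.Set Int) t =>
                  if PySem.Set.contains ns.2 t then ns
                  else (ns.1 ++ [t], PySem.Set.add ns.2 t)) ns) (acc ++ E.1, E.2) := by
        simp only [List.foldl_cons]
        rw [foldB_shift (PySem.Dict.getD succs n []) acc seen]
      rw [hfold]
      set R := rest.foldl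
        (fun (ns : List Int × PySem.Set Int) node =>
          (PySem.Dict.getD succs node []).foldl
            (fun (ns : List Int × PySem.Set Int) t =>
              if PySem.Set.contains ns.2 t then ns
              else (ns.1 ++ [t], PySem.Set.add ns.2 t)) ns) (acc ++ E.1, E.2)
        with hR
      have h3 : (order ++ [n]).length + rest.length = order.length + (n :: rest).length := by
        simp only [List.length_append, List.length_cons, List.length_nil]
        omega
      have h4 : (order ++ [n]) ++ (rest ++ R.1) = order ++ (n :: rest ++ R.1) := by
        simp
      rw [h3, h4]

-- a scan whose index is at the end returns the worklist unchanged
theorem reachScan_at_end (succs : PySem.Dict Int (List Int)) (f : Nat)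
    (reach : List Int) (seen : PySem.Set Int) :
    reachScan succs f reach reach.length seen = reach := by
  cases f with
  | zero => simp [reachScan]
  | succ f => simp [reachScan]

-- B's level loop computes the reachScan worklist, given enough fuel on both sides
theorem levelLoop_eq_reachScan (succs : PySem.Dict Int (List Int)) (allT : List Int)
    (H : ∀ n t, t ∈ PySem.Dict.getD succs n [] → t ∈ allT) :
    ∀ (fB : Nat) (order frontier : List Int) (seen : PySem.Set Int) (g : Nat),
      (frontier ≠ [] → pvFc allT seen + 1 ≤ fB) →
      frontier.length + pvFc allT seen ≤ g →
      levelLoop succs fB order frontier seen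
        = reachScan succs g (order ++ frontier) order.length seen := by
  intro fB
  induction fB with
  | zero =>
      intro order frontier seen g h1 _
      have hfr : frontier = [] := by
        by_contra hne
        have := h1 hne
        omega
      subst hfr
      simp [levelLoop, reachScan_at_end]
  | succ f ih =>
      intro order frontier seen g h1 h2
      by_cases hfr : frontier = []
      · subst hfr
        simp [levelLoop, reachScan_at_end]
      · have hne : frontier.isEmpty = false := by
          cases frontier with
          | nil => exact absurd rfl hfr
          | cons a l => rfl
        simp only [levelLoop, hne, Bool.false_eq_true, if_false]
        set ns := frontier.foldl
          (fun (ns : List Int × PySem.Set Int) node =>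
            (PySem.Dict.getD succs node []).foldl
              (fun (ns : List Int × PySem.Set Int) t =>
                if PySem.Set.contains ns.2 t then ns
                else (ns.1 ++ [t], PySem.Set.add ns.2 t)) ns) ([], seen)
          with hns
        have hbound := level_fold_bound succs allT H frontier [] seen
        rw [← hns] at hbound
        simp only [List.length_nil, Nat.add_zero] at hbound
        have hg : g = frontier.length + (g - frontier.length) := by omega
        rw [hg]
        have hpeel := reachScan_peel succs frontier (g - frontier.length) order [] seen
        simp only [List.append_nil] at hpeel
        rw [← hns] at hpeel
        rw [hpeel]
        have ihres := ih (order ++ frontier) ns.1 ns.2 (g - frontier.length)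
          (by
            intro hne1
            have : 1 ≤ ns.1.length := by
              cases hx : ns.1 with
              | nil => exact absurd hx hne1
              | cons a l => simp
            have hfc := h1 hfr
            omega)
          (by
            have hfc := h1 hfr
            omega)
        have hassoc : order ++ (frontier ++ ns.1) = (order ++ frontier) ++ ns.1 := by
          simp
        have hlen : order.length + frontier.length = (order ++ frontier).length := by
          simp
        rw [hassoc, hlen]
        exact ihres

-- every successor-list value of the built dict sits in the flattened value lists
theorem getD_mk_mem (successors : List (Int × List Int)) (n t : Int)
    (ht : t ∈ PySem.Dict.getD (PySem.Dict.mk successors) n []) :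
    t ∈ (successors.map (fun p => p.2)).flatten := by
  simp only [PySem.Dict.getD, PySem.Dict.get?] at ht
  cases hf : List.find? (fun p => p.1 == n) (PySem.Dict.mk successors).items with
  | none => rw [hf] at ht; simp at ht
  | some p =>
      rw [hf] at ht
      simp only [Option.map_some, Option.getD_some] at ht
      have hp : p ∈ successors := List.mem_of_find?_eq_some hf
      exact List.mem_flatten.mpr ⟨p.2, List.mem_map_of_mem hp, ht⟩

-- the number of distinct unseen values is at most the total successor count
theorem fuel_ok (successors : List (Int × List Int)) (seen : PySem.Set Int) :
    pvFc ((successors.map (fun p => p.2)).flatten) seen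
      ≤ (successors.map (fun p => p.2.length)).sum := by
  have h1 : pvFc ((successors.map (fun p => p.2)).flatten) seen
      ≤ ((successors.map (fun p => p.2)).flatten).length := List.length_filter_le _ _
  have h2 : ((successors.map (fun p => p.2)).flatten).length
      = (successors.map (fun p => p.2.length)).sum := by
    rw [List.length_flatten, List.map_map]
    rfl
  omega

-- per root: B's two phases equal A's fused BFS
theorem root_step_eq (successors : List (Int × List Int)) (root : Int)
    (src : PySem.Dict Int (PySem.Set Int)) :
    bfsLoopA (PySem.Dict.mk successors) root
        (1 + (successors.map (fun p => p.2.length)).sum) [root]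
        (PySem.Set.add PySem.Set.empty root) src
      = recordRoot (PySem.Dict.mk successors) root
          (levelLoop (PySem.Dict.mk successors)
            (1 + (successors.map (fun p => p.2.length)).sum) [] [root]
            (PySem.Set.add PySem.Set.empty root)) src := by
  have hlev := levelLoop_eq_reachScan (PySem.Dict.mk successors)
    ((successors.map (fun p => p.2)).flatten) (getD_mk_mem successors)
    (1 + (successors.map (fun p => p.2.length)).sum) [] [root]
    (PySem.Set.add PySem.Set.empty root)
    (1 + (successors.map (fun p => p.2.length)).sum)
    (by
      intro _
      have := fuel_ok successors (PySem.Set.add PySem.Set.empty root)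
      omega)
    (by
      have := fuel_ok successors (PySem.Set.add PySem.Set.empty root)
      simp only [List.length_cons, List.length_nil]
      omega)
  simp only [List.nil_append, List.length_nil] at hlev
  rw [hlev]
  exact bfs_root (PySem.Dict.mk successors) root _ src

-- ===== VERDICT (by name: the statement is the Claim_ definition above) =====
theorem flow_sources_py_spec : Claim_equal_flow_sources_py := by
  intro successors root_uids _
  unfold Spec_flow_sources_py flow_sources_py flow_sources_py_alt
  simp only [root_step_eq]
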